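-- pv_equiv track=rewrite | github.com/JackDixon-W/ca117 | W3/3.2/wordcomps_032.py | vowelCheck
-- ===== SOURCE A (Python) =====
-- def vowelCheck(word):
--   vowels = ['a', 'e', 'i', 'o', 'u']
--   for char in word:
--     if char in vowels:
--       vowels.remove(char)
--   if len(vowels) == 0:
--     return True
--   else:
--     return False
-- ===== SOURCE B (Python) =====
-- def vowelCheck(word):
--   return all(v in word for v in 'aeiou')
-- ===== Notes on version B (the rewrite author's own statement) =====
-- stated objective: idiomatic
-- what changed: B loops over the five fixed vowels checking membership in the word, instead of A's stateful single pass over the word with list removal.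
import Mathlib
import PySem

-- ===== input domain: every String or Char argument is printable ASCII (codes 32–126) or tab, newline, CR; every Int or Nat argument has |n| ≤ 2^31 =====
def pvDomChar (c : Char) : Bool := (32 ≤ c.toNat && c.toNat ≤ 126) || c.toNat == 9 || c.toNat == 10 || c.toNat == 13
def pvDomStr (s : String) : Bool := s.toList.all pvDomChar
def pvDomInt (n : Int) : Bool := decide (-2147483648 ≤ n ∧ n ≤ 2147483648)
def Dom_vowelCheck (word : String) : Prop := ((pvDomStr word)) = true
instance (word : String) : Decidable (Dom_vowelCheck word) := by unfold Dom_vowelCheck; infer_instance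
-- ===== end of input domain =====

-- B replaces A's stateful pass over the word (removing found vowels from a list) by the
-- idiomatic check that every one of the five vowels occurs in the word (objective: idiomatic).

-- ===== PORT A =====
-- loop over the word's characters, removing each character found from the vowels list
def vowelCheckLoop : List Char → List Char → List Char
  | vs, [] => vs
  | vs, c :: cs =>
      vowelCheckLoop (if vs.contains c then (PySem.List.remove? vs c).getD vs else vs) cs

def vowelCheck (word : String) : Bool :=
  if (vowelCheckLoop ['a','e','i','o','u'] word.toList).length = 0 then true else false

-- ===== PORT B =====
def vowelCheck_alt (word : String) : Bool :=
  ['a','e','i','o','u'].all (fun v => word.toList.contains v)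

-- ===== PRECONDITION & SPEC =====
def Spec_vowelCheck (word : String) (out : Bool) : Prop := out = vowelCheck_alt word
instance (word : String) (out : Bool) : Decidable (Spec_vowelCheck word out) := by unfold Spec_vowelCheck; infer_instance

-- ===== CLAIM (what is proved, stated in full; the proofs are below) =====
def Claim_equal_vowelCheck : Prop := ∀ (word : String), Dom_vowelCheck word → Spec_vowelCheck word (vowelCheck word)

-- ===== LEMMAS AND PROOFS =====

-- the loop keeps exactly the vowels not seen among the processed characters
theorem vowelCheckLoop_eq_filter (cs : List Char) :
    ∀ vs : List Char, vs.Nodup →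
      vowelCheckLoop vs cs = vs.filter (fun v => !cs.contains v) := by
  induction cs with
  | nil => intro vs _; simp [vowelCheckLoop]
  | cons c cs ih =>
      intro vs hnd
      by_cases hc : vs.contains c
      · have hmem : c ∈ vs := by simpa using hc
        have hrm : PySem.List.remove? vs c = some (vs.erase c) :=
          PySem.List.remove?_eq_some_erase _ _ hmem
        have herase : vs.erase c = vs.filter (fun v => !(v == c)) := by
          simpa using hnd.erase_eq_filter c
        simp only [vowelCheckLoop, hc, if_pos, hrm, Option.getD_some]
        rw [ih _ (hnd.erase c), herase, List.filter_filter]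
        apply List.filter_congr
        intro v _
        by_cases hvc : v = c <;> simp [hvc]
      · have hcm : c ∉ vs := by simpa using hc
        simp only [vowelCheckLoop, hc, if_neg, Bool.false_eq_true, not_false_iff]
        rw [ih _ hnd]
        apply List.filter_congr
        intro v hv
        have : v ≠ c := fun h => hcm (h ▸ hv)
        simp [this]

theorem vowelCheck_spec : Claim_equal_vowelCheck := by
  intro word _
  unfold Spec_vowelCheck vowelCheck vowelCheck_alt
  rw [vowelCheckLoop_eq_filter _ _ (by decide)]
  have key : ((['a','e','i','o','u'] : List Char).filter
      (fun v => !word.toList.contains v)).length = 0 ↔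
      (['a','e','i','o','u'] : List Char).all (fun v => word.toList.contains v) = true := by
    simp [List.length_eq_zero_iff, List.filter_eq_nil_iff]
  split_ifs with h
  · exact (key.mp h).symm
  · have hne : ¬ ((['a','e','i','o','u'] : List Char).all
        (fun v => word.toList.contains v) = true) := fun ha => h (key.mpr ha)
    simp only [Bool.not_eq_true] at hne
    exact hne.symm
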